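-- pv_equiv track=rewrite | github.com/asem-ai/labs_1 | lab1/1.py | group_by_last_letter
-- ===== SOURCE A (Python) =====
-- def group_by_last_letter(words):
--     result = {}
--     for word in words:
--         if not word:
--             continue
--         last_letter = word[-1].lower()
--         if last_letter not in result:
--             result[last_letter] = [word]
--         else:
--             if word not in result[last_letter]:
--                 result[last_letter].append(word)
--     return result
-- ===== SOURCE B (Python) =====
-- def group_by_last_letter(words):
--     seen = set()
--     unique = []
--     for word in words:
--         if word and word not in seen:
--             seen.add(word)
--             unique.append(word)
--     result = {}
--     for word in unique:
--         result.setdefault(word[-1].lower(), []).append(word)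
--     return result
-- ===== Notes on version B (the rewrite author's own statement) =====
-- stated objective: faster
-- what changed: A interleaves grouping with a per-group list membership test on each insertion; B first deduplicates the non-empty words globally in one pass with a seen hash set, then groups them with an unconditional setdefault-append pass, eliminating A's inner 'word not in result[last_letter]' scan.
import Mathlib
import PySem

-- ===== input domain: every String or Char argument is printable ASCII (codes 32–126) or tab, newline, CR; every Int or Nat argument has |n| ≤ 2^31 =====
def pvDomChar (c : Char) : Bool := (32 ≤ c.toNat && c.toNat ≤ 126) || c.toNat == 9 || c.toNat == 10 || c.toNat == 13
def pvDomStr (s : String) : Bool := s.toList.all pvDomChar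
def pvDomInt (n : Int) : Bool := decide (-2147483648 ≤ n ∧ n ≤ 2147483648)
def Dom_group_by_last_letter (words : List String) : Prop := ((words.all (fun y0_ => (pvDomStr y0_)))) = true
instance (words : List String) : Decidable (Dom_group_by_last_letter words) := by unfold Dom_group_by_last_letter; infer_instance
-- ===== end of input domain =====

-- B replaces A's interleaved per-group membership test by a global dedup pass
-- followed by an unconditional setdefault-append grouping pass (alternative decomposition, same cost class).


-- ===== PORT A =====
def group_by_last_letter (words : List String) : List (String × List String) :=
  (words.foldl (fun (result : PySem.Dict String (List String)) word =>
    if word = "" then result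
    else
      let last_letter := PySem.Str.lower (String.ofList [(PySem.Str.pyGet? word (-1)).getD ' '])
      match result.get? last_letter with
      | none => result.insert last_letter [word]
      | some lst => if word ∈ lst then result else result.insert last_letter (lst ++ [word])
  ) PySem.Dict.empty).items

-- ===== PORT B =====
def group_by_last_letter_alt (words : List String) : List (String × List String) :=
  let unique := (words.foldl (fun (p : PySem.Set String × List String) word =>
      if word = "" then p
      else if PySem.Set.contains p.1 word then p
      else (PySem.Set.add p.1 word, p.2 ++ [word])) (PySem.Set.empty, [])).2
  -- result.setdefault(k, []).append(word)  ==  result[k] = result.get(k, []) + [word]  ==  Dict.modify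
  (unique.foldl (fun (result : PySem.Dict String (List String)) word =>
      result.modify (PySem.Str.lower (String.ofList [(PySem.Str.pyGet? word (-1)).getD ' '])) [] (· ++ [word]))
    PySem.Dict.empty).items

-- ===== PRECONDITION & SPEC =====
def Spec_group_by_last_letter (words : List String) (out : List (String × List String)) : Prop := out = group_by_last_letter_alt words
instance (words : List String) (out : List (String × List String)) : Decidable (Spec_group_by_last_letter words out) := by unfold Spec_group_by_last_letter; infer_instance

-- ===== CLAIM (what is proved, stated in full; the proofs are below) =====
def Claim_equal_group_by_last_letter : Prop := ∀ (words : List String), Dom_group_by_last_letter words → Spec_group_by_last_letter words (group_by_last_letter words)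

-- ===== LEMMAS AND PROOFS =====

/-- the last-letter key both programs compute -/
def pvKey (w : String) : String := PySem.Str.lower (String.ofList [(PySem.Str.pyGet? w (-1)).getD ' '])

/-- A's loop body -/
def stepA (result : PySem.Dict String (List String)) (word : String) : PySem.Dict String (List String) :=
  if word = "" then result
  else
    match result.get? (pvKey word) with
    | none => result.insert (pvKey word) [word]
    | some lst => if word ∈ lst then result else result.insert (pvKey word) (lst ++ [word])

/-- B's grouping body -/
def stepB (result : PySem.Dict String (List String)) (word : String) : PySem.Dict String (List String) :=
  result.modify (pvKey word) [] (· ++ [word])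

def buildB (u : List String) : PySem.Dict String (List String) := u.foldl stepB PySem.Dict.empty

/-- B's dedup pass, tracked on the unique-list only -/
def dedup1 (ws : List String) (u : List String) : List String :=
  ws.foldl (fun u w => if w = "" then u else if w ∈ u then u else u ++ [w]) u

lemma portA_eq (words : List String) :
    group_by_last_letter words = (words.foldl stepA PySem.Dict.empty).items := rfl

lemma pairFold (ws : List String) (u : List String) :
    ws.foldl (fun (p : PySem.Set String × List String) word =>
      if word = "" then p
      else if PySem.Set.contains p.1 word then p
      else (PySem.Set.add p.1 word, p.2 ++ [word])) (u, u) = (dedup1 ws u, dedup1 ws u) := by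
  induction ws generalizing u with
  | nil => rfl
  | cons w ws ih =>
      simp only [List.foldl, dedup1, PySem.Set.contains, PySem.Set.add]
      by_cases h0 : w = "" <;> by_cases hm : w ∈ u <;>
        simp_all [dedup1, PySem.Set.contains, PySem.Set.add]
  
lemma portB_eq (words : List String) :
    group_by_last_letter_alt words = (buildB (dedup1 words [])).items := by
  unfold group_by_last_letter_alt
  rw [show ((PySem.Set.empty : PySem.Set String), ([] : List String)) = (([] : List String), ([] : List String)) from rfl,
      pairFold]
  rfl

/-- buildB's group at key k collects exactly the u-elements with that key, in order. -/
lemma buildB_getD (u : List String) (k : String) :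
    (buildB u).getD k [] = u.filter (fun x => pvKey x == k) := by
  induction u using List.reverseRecOn with
  | nil => rfl
  | append_singleton u w ih =>
      have : buildB (u ++ [w]) = stepB (buildB u) w := by
        simp [buildB, List.foldl_append]
      rw [this, stepB, PySem.Dict.getD_modify, List.filter_append]
      by_cases hk : k = pvKey w
      · subst hk; simp [ih]
      · simp [hk, ih, Ne.symm hk]

lemma mem_buildB_group (u : List String) (w : String) :
    w ∈ (buildB u).getD (pvKey w) [] ↔ w ∈ u := by
  rw [buildB_getD]
  simp [List.mem_filter]

lemma main_lemma (ws u : List String) :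
    ws.foldl stepA (buildB u) = buildB (dedup1 ws u) := by
  induction ws generalizing u with
  | nil => rfl
  | cons w ws ih =>
      by_cases h0 : w = ""
      · simp [List.foldl, dedup1, stepA, h0]
        exact ih u
      · by_cases hm : w ∈ u
        · have hg : w ∈ (buildB u).getD (pvKey w) [] := (mem_buildB_group u w).mpr hm
          have hskip : stepA (buildB u) w = buildB u := by
            unfold stepA
            simp only [h0, if_false]
            cases hget : (buildB u).get? (pvKey w) with
            | none =>
                exfalso
                rw [PySem.Dict.getD_eq_get?_getD, hget] at hg
                simp at hg
            | some lst =>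
                rw [PySem.Dict.getD_eq_get?_getD, hget] at hg
                simp only [Option.getD_some] at hg
                simp [hg]
          simp only [List.foldl, hskip, dedup1, h0, if_false, hm, if_true]
          exact ih u
        · have hg : w ∉ (buildB u).getD (pvKey w) [] := fun h => hm ((mem_buildB_group u w).mp h)
          have hstep : stepA (buildB u) w = buildB (u ++ [w]) := by
            have hb : buildB (u ++ [w]) = stepB (buildB u) w := by
              simp [buildB, List.foldl_append]
            rw [hb]
            unfold stepA stepB
            simp only [h0, if_false]
            cases hget : (buildB u).get? (pvKey w) with
            | none =>
                rw [PySem.Dict.modify, PySem.Dict.getD_eq_get?_getD, hget]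
                rfl
            | some lst =>
                rw [PySem.Dict.getD_eq_get?_getD, hget] at hg
                simp only [Option.getD_some] at hg
                rw [PySem.Dict.modify, PySem.Dict.getD_eq_get?_getD, hget]
                simp [hg]
          simp only [List.foldl, hstep, dedup1, h0, if_false, hm, if_false]
          exact ih (u ++ [w])

-- ===== VERDICT (by name: the statement is the Claim_ definition above) =====
theorem group_by_last_letter_spec : Claim_equal_group_by_last_letter := by
  intro words _
  show group_by_last_letter words = group_by_last_letter_alt words
  rw [portA_eq, portB_eq]
  have h : PySem.Dict.empty = buildB [] := rfl
  rw [h, main_lemma]
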